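-- pv_equiv track=rewrite | github.com/raphschlatt/ads-and | src/author_name_disambiguation/approaches/nand/cluster.py | _block_size_bucket_label
-- ===== SOURCE A (Python) =====
-- _BLOCK_SIZE_HIST_BUCKETS = [
--     ("1", 1, 1),
--     ("2", 2, 2),
--     ("3-4", 3, 4),
--     ("5-8", 5, 8),
--     ("9-16", 9, 16),
--     ("17-32", 17, 32),
--     ("33-64", 33, 64),
--     ("65+", 65, None),
-- ]
--
-- def _block_size_bucket_label(size: int) -> str | None:
--     for label, min_size, max_size in _BLOCK_SIZE_HIST_BUCKETS:
--         if size < int(min_size):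
--             continue
--         if max_size is not None and size > int(max_size):
--             continue
--         return str(label)
--     return None
-- ===== SOURCE B (Python) =====
-- _BUCKET_LABELS = ("1", "2", "3-4", "5-8", "9-16", "17-32", "33-64")
--
-- def _block_size_bucket_label(size: int) -> str | None:
--     if size < 1:
--         return None
--     k = (size - 1).bit_length()  # k == ceil(log2(size)) for size >= 1
--     return _BUCKET_LABELS[k] if k < 7 else "65+"
-- ===== Notes on version B (the rewrite author's own statement) =====
-- stated objective: idiomatic
-- what changed: Replaced the linear scan over the (label, min, max) bucket table with a closed-form bucket index k = (size-1).bit_length() that directly selects the label from a fixed tuple.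
import Mathlib
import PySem

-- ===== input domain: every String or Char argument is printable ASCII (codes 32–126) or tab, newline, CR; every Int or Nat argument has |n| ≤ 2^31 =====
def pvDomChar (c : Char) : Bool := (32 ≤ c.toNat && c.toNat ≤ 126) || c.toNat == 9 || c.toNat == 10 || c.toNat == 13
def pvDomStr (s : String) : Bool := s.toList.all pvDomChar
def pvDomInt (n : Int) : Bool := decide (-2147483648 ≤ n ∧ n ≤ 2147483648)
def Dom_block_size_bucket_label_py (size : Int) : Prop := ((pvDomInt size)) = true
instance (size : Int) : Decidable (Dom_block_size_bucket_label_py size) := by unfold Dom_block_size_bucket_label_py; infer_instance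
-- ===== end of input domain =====

-- B replaces A's linear scan over the bucket table by a closed-form bucket index
-- k = (size-1).bit_length() selecting from a fixed label tuple (idiomatic/O(1); same values everywhere).

-- ===== PORT A =====
-- the module constant _BLOCK_SIZE_HIST_BUCKETS: (label, min_size, max_size)
def pvBucketsA : List (String × Int × Option Int) :=
  [("1", 1, some 1), ("2", 2, some 2), ("3-4", 3, some 4), ("5-8", 5, some 8),
   ("9-16", 9, some 16), ("17-32", 17, some 32), ("33-64", 33, some 64), ("65+", 65, none)]

-- the for-loop of A: 'continue' = recurse on the rest, 'return' = some label
def pvLoopA (size : Int) : List (String × Int × Option Int) → Option String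
  | [] => none
  | (label, minSize, maxSize) :: rest =>
    if size < minSize then pvLoopA size rest
    else match maxSize with
      | some m => if size > m then pvLoopA size rest else some label
      | none => some label

def block_size_bucket_label_py (size : Int) : Option String :=
  pvLoopA size pvBucketsA

-- ===== PORT B =====
def pvBucketLabels : List String := ["1", "2", "3-4", "5-8", "9-16", "17-32", "33-64"]

def block_size_bucket_label_py_alt (size : Int) : Option String :=
  if size < 1 then none
  else
    let k := PySem.Int.bitLength (size - 1)   -- (size - 1).bit_length()
    if k < 7 then some (pvBucketLabels.getD k "") else some "65+"

-- ===== PRECONDITION & SPEC =====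
def Spec_block_size_bucket_label_py (size : Int) (out : Option String) : Prop := out = block_size_bucket_label_py_alt size
instance (size : Int) (out : Option String) : Decidable (Spec_block_size_bucket_label_py size out) := by unfold Spec_block_size_bucket_label_py; infer_instance

-- ===== CLAIM (what is proved, stated in full; the proofs are below) =====
def Claim_equal_block_size_bucket_label_py : Prop := ∀ (size : Int), Dom_block_size_bucket_label_py size → Spec_block_size_bucket_label_py size (block_size_bucket_label_py size)

-- ===== LEMMAS AND PROOFS =====

lemma pvA_big {size : Int} (h : 65 ≤ size) : block_size_bucket_label_py size = some "65+" := by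
  unfold block_size_bucket_label_py pvBucketsA
  rw [pvLoopA, if_neg (by omega), if_pos (by omega)]
  rw [pvLoopA, if_neg (by omega), if_pos (by omega)]
  rw [pvLoopA, if_neg (by omega), if_pos (by omega)]
  rw [pvLoopA, if_neg (by omega), if_pos (by omega)]
  rw [pvLoopA, if_neg (by omega), if_pos (by omega)]
  rw [pvLoopA, if_neg (by omega), if_pos (by omega)]
  rw [pvLoopA, if_neg (by omega), if_pos (by omega)]
  rw [pvLoopA, if_neg (by omega)]

lemma pvA_nonpos {size : Int} (h : size < 1) : block_size_bucket_label_py size = none := by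
  unfold block_size_bucket_label_py pvBucketsA
  rw [pvLoopA, if_pos (by omega)]
  rw [pvLoopA, if_pos (by omega)]
  rw [pvLoopA, if_pos (by omega)]
  rw [pvLoopA, if_pos (by omega)]
  rw [pvLoopA, if_pos (by omega)]
  rw [pvLoopA, if_pos (by omega)]
  rw [pvLoopA, if_pos (by omega)]
  rw [pvLoopA, if_pos (by omega)]
  rfl

lemma pvB_big {size : Int} (h : 65 ≤ size) : block_size_bucket_label_py_alt size = some "65+" := by
  unfold block_size_bucket_label_py_alt
  rw [if_neg (by omega)]
  have h2 : (64 : Nat) ≤ (size - 1).natAbs := by omega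
  have h3 : ¬ PySem.Int.bitLength (size - 1) < 7 := by
    intro hlt
    have hb := PySem.Int.lt_two_pow_bitLength (size - 1)
    have : (size - 1).natAbs < 2 ^ 6 :=
      lt_of_lt_of_le hb (Nat.pow_le_pow_right (by norm_num) (by omega))
    simp only [pow_succ, pow_zero] at this
    omega
  simp [h3]

-- ===== VERDICT (by name: the statement is the Claim_ definition above) =====
theorem block_size_bucket_label_py_spec : Claim_equal_block_size_bucket_label_py := by
  unfold Claim_equal_block_size_bucket_label_py
  intro size _
  unfold Spec_block_size_bucket_label_py
  rcases lt_trichotomy size 1 with h | h | h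
  · rw [pvA_nonpos h]
    unfold block_size_bucket_label_py_alt
    rw [if_pos h]
  · subst h; decide
  · by_cases h65 : 65 ≤ size
    · rw [pvA_big h65, pvB_big h65]
    · -- 2 ≤ size ≤ 64: finite case split
      interval_cases size <;> decide
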